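-- pv_equiv track=rewrite | github.com/YongjoonSeo/What_I_Studied | python/swea/advanced/graph1.py | BFS
-- ===== SOURCE A (Python) =====
-- from collections import deque
--
-- def BFS(n, obj):
--     cnt = 0
--     q = deque([n])
--     while q:
--         cnt += 1
--         for _ in range(len(q)):
--             v = q.popleft()
--             for i in range(4):
--                 if i == 0:
--                     temp = v+1
--                 elif i == 1:
--                     temp = v-1
--                 elif i == 2:
--                     temp = v*2
--                 else:
--                     temp = v-10
--                 if temp == obj: return cnt
--                 q.append(temp)
-- ===== SOURCE B (Python) =====
-- def BFS(n, obj):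
--     cnt = 0
--     visited = {n}
--     frontier = [n]
--     while True:
--         cnt += 1
--         nxt = []
--         for v in frontier:
--             for temp in (v + 1, v - 1, v * 2, v - 10):
--                 if temp == obj:
--                     return cnt
--                 if temp not in visited:
--                     visited.add(temp)
--                     nxt.append(temp)
--         frontier = nxt
-- ===== Notes on version B (the rewrite author's own statement) =====
-- stated objective: alternative
-- what changed: A's deque re-enqueues every generated state so its per-level queue quadruples (O(4^d) nodes for answer d); B runs the BFS over distinct states only, with a global visited set and a per-level frontier list, returning the same level count.
import Mathlib
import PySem

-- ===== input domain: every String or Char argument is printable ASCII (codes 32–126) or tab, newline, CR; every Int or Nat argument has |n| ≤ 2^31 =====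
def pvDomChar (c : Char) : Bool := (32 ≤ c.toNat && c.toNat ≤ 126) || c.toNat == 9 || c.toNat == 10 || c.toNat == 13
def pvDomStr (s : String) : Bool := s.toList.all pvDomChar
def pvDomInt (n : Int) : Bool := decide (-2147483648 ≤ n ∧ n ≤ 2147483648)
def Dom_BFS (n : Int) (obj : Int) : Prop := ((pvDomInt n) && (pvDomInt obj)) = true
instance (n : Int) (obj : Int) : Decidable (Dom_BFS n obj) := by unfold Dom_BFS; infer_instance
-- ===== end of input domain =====

-- B replaces A's duplicating BFS queue (which re-enqueues every generated state) by a
-- BFS over distinct states with a global visited set; the return value is the same.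
-- Both while-loops are made total with fuel |obj - n| + 2, a provable upper bound on
-- the level at which the Python loops return (±1 chain reaches obj); the fuel-exhausted
-- and empty-queue branches are unreachable for the Python programs.

-- the four successor states of v, in A's generation order (shared helper)
def kids (v : Int) : List Int := [v + 1, v - 1, v * 2, v - 10]

-- ===== PORT A =====
-- one pass over the level queue: none = some generated temp equals obj (return cnt);
-- some ts = the children appended for the next level
-- acc holds the children appended so far, most recent first (deque appends, kept
-- tail-recursive so the port evaluates on large queues); the built queue is acc.reverse
def aLevel (obj : Int) : List Int → List Int → Option (List Int)
  | [], acc => some acc.reverse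
  | v :: rest, acc =>
    if v + 1 = obj then none
    else if v - 1 = obj then none
    else if v * 2 = obj then none
    else if v - 10 = obj then none
    else aLevel obj rest ((v - 10) :: (v * 2) :: (v - 1) :: (v + 1) :: acc)

def aLoop (obj : Int) : Nat → Int → List Int → Int
  | 0, _, _ => 0                 -- fuel exhausted (unreachable)
  | fuel + 1, cnt, q =>
    if q = [] then 0             -- 'while q:' exit (unreachable: q never empties)
    else match aLevel obj q [] with
      | none => cnt + 1
      | some q' => aLoop obj fuel (cnt + 1) q'

def BFS (n : Int) (obj : Int) : Int := aLoop obj ((obj - n).natAbs + 2) 0 [n]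

-- ===== PORT B =====
-- inner loop over the four temps of one v: threads (visited, nxt)
def bRow (obj : Int) : List Int → PySem.Set Int → List Int → Option (PySem.Set Int × List Int)
  | [], vis, nxt => some (vis, nxt)
  | t :: ts, vis, nxt =>
    if t = obj then none
    else if PySem.Set.contains vis t then bRow obj ts vis nxt
    else bRow obj ts (PySem.Set.add vis t) (nxt ++ [t])

-- loop 'for v in frontier'
def bLevel (obj : Int) : List Int → PySem.Set Int → List Int → Option (PySem.Set Int × List Int)
  | [], vis, nxt => some (vis, nxt)
  | v :: rest, vis, nxt =>
    match bRow obj (kids v) vis nxt with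
    | none => none
    | some (vis', nxt') => bLevel obj rest vis' nxt'

def bLoop (obj : Int) : Nat → Int → PySem.Set Int → List Int → Int
  | 0, _, _, _ => 0              -- fuel exhausted (unreachable)
  | fuel + 1, cnt, vis, frontier =>
    match bLevel obj frontier vis [] with
    | none => cnt + 1
    | some (vis', nxt) => bLoop obj fuel (cnt + 1) vis' nxt

def BFS_alt (n : Int) (obj : Int) : Int :=
  bLoop obj ((obj - n).natAbs + 2) 0 (PySem.Set.ofList [n]) [n]

-- ===== PRECONDITION & SPEC =====
def Spec_BFS (n : Int) (obj : Int) (out : Int) : Prop := out = BFS_alt n obj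
instance (n : Int) (obj : Int) (out : Int) : Decidable (Spec_BFS n obj out) := by unfold Spec_BFS; infer_instance

-- ===== CLAIM (what is proved, stated in full; the proofs are below) =====
def Claim_equal_BFS : Prop := ∀ (n : Int) (obj : Int), Dom_BFS n obj → Spec_BFS n obj (BFS n obj)

-- ===== LEMMAS AND PROOFS =====

-- states reachable from n in exactly j moves
def reachN (n : Int) : Nat → Int → Prop
  | 0, x => x = n
  | j + 1, x => ∃ v, reachN n j v ∧ x ∈ kids v

theorem reachN_nonempty (n : Int) : ∀ j : Nat, ∃ x, reachN n j x := by
  intro j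
  induction j with
  | zero => exact ⟨n, rfl⟩
  | succ j ih =>
    obtain ⟨x, hx⟩ := ih
    exact ⟨x + 1, x, hx, by simp [kids]⟩

theorem mem_kids (x v : Int) :
    x ∈ kids v ↔ (v + 1 = x ∨ v - 1 = x ∨ v * 2 = x ∨ v - 10 = x) := by
  simp [kids, eq_comm]

theorem aLevel_none_iff (obj : Int) (l : List Int) :
    ∀ acc, aLevel obj l acc = none ↔ ∃ v ∈ l, obj ∈ kids v := by
  induction l with
  | nil => intro acc; simp [aLevel]
  | cons v rest ih =>
    intro acc
    simp only [aLevel]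
    split_ifs with h1 h2 h3 h4
    · exact iff_of_true rfl ⟨v, by simp, (mem_kids obj v).mpr (by tauto)⟩
    · exact iff_of_true rfl ⟨v, by simp, (mem_kids obj v).mpr (by tauto)⟩
    · exact iff_of_true rfl ⟨v, by simp, (mem_kids obj v).mpr (by tauto)⟩
    · exact iff_of_true rfl ⟨v, by simp, (mem_kids obj v).mpr (by tauto)⟩
    · rw [ih]
      constructor
      · rintro ⟨w, hw, hk⟩; exact ⟨w, List.mem_cons_of_mem _ hw, hk⟩
      · rintro ⟨w, hw, hk⟩
        rcases List.mem_cons.mp hw with rfl | hw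
        · rcases (mem_kids obj w).mp hk with h | h | h | h <;> tauto
        · exact ⟨w, hw, hk⟩

theorem aLevel_some_mem (obj : Int) (l : List Int) :
    ∀ (acc l' : List Int), aLevel obj l acc = some l' →
    ∀ x, x ∈ l' ↔ x ∈ acc ∨ ∃ v ∈ l, x ∈ kids v := by
  induction l with
  | nil =>
    intro acc l' h x
    simp [aLevel] at h
    subst h
    simp
  | cons v rest ih =>
    intro acc l' h x
    simp only [aLevel] at h
    split_ifs at h
    rw [ih _ _ h x]
    simp only [List.mem_cons, kids]
    constructor
    · rintro ((rfl | rfl | rfl | rfl | hacc) | ⟨w, hw, hk⟩)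
      · exact Or.inr ⟨v, Or.inl rfl, by simp⟩
      · exact Or.inr ⟨v, Or.inl rfl, by simp⟩
      · exact Or.inr ⟨v, Or.inl rfl, by simp⟩
      · exact Or.inr ⟨v, Or.inl rfl, by simp⟩
      · exact Or.inl hacc
      · exact Or.inr ⟨w, Or.inr hw, hk⟩
    · rintro (hacc | ⟨w, (rfl | hw), hk⟩)
      · tauto
      · tauto
      · exact Or.inr ⟨w, hw, hk⟩

theorem bRow_none_iff (obj : Int) (ts : List Int) :
    ∀ (vis : PySem.Set Int) (nxt : List Int), bRow obj ts vis nxt = none ↔ obj ∈ ts := by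
  induction ts with
  | nil => intro vis nxt; simp [bRow]
  | cons t ts ih =>
    intro vis nxt
    simp only [bRow]
    split_ifs with h1 h2
    · simp [h1.symm]
    · rw [ih]; simp [List.mem_cons]; intro h; exact absurd h.symm h1
    · rw [ih]; simp [List.mem_cons]; intro h; exact absurd h.symm h1

theorem bRow_some (obj : Int) (ts : List Int) :
    ∀ (vis : PySem.Set Int) (nxt : List Int) (vis' : PySem.Set Int) (nxt' : List Int),
    bRow obj ts vis nxt = some (vis', nxt') →
      (∀ x, x ∈ vis' ↔ x ∈ vis ∨ x ∈ ts) ∧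
      (∀ x, x ∈ nxt' ↔ x ∈ nxt ∨ (x ∈ ts ∧ x ∉ vis)) := by
  induction ts with
  | nil =>
    intro vis nxt vis' nxt' h
    simp [bRow] at h
    obtain ⟨h1, h2⟩ := h
    subst h1; subst h2; simp
  | cons t ts ih =>
    intro vis nxt vis' nxt' h
    simp only [bRow] at h
    split_ifs at h with h1 h2
    · -- t already visited
      have hmem : t ∈ vis := (PySem.Set.contains_iff _ _).mp h2
      obtain ⟨hv, hn⟩ := ih vis nxt vis' nxt' h
      constructor
      · intro x
        rw [hv x, List.mem_cons]
        constructor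
        · tauto
        · rintro (h | rfl | h) <;> tauto
      · intro x
        rw [hn x, List.mem_cons]
        constructor
        · tauto
        · rintro (h | ⟨(rfl | h), hnv⟩)
          · tauto
          · exact absurd hmem hnv
          · tauto
    · -- t new: added to vis and nxt
      have hmem : t ∉ vis := fun hc => h2 ((PySem.Set.contains_iff _ _).mpr hc)
      obtain ⟨hv, hn⟩ := ih (PySem.Set.add vis t) (nxt ++ [t]) vis' nxt' h
      constructor
      · intro x
        rw [hv x, PySem.Set.mem_add, List.mem_cons]
        tauto
      · intro x
        rw [hn x, List.mem_append, List.mem_singleton, List.mem_cons]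
        have hadd : x ∈ PySem.Set.add vis t ↔ x ∈ vis ∨ x = t := PySem.Set.mem_add _ _ _
        constructor
        · rintro ((h | rfl) | ⟨hts, hnv⟩)
          · exact Or.inl h
          · exact Or.inr ⟨Or.inl rfl, hmem⟩
          · rw [hadd] at hnv
            exact Or.inr ⟨Or.inr hts, fun hc => hnv (Or.inl hc)⟩
        · rintro (h | ⟨(rfl | hts), hnv⟩)
          · exact Or.inl (Or.inl h)
          · exact Or.inl (Or.inr rfl)
          · by_cases hxt : x = t
            · exact Or.inl (Or.inr hxt)
            · refine Or.inr ⟨hts, ?_⟩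
              rw [hadd]
              rintro (hc | hc)
              · exact hnv hc
              · exact hxt hc

theorem bLevel_none_iff (obj : Int) (fr : List Int) :
    ∀ (vis : PySem.Set Int) (nxt : List Int),
    bLevel obj fr vis nxt = none ↔ ∃ v ∈ fr, obj ∈ kids v := by
  induction fr with
  | nil => intro vis nxt; simp [bLevel]
  | cons v rest ih =>
    intro vis nxt
    simp only [bLevel]
    rcases hrow : bRow obj (kids v) vis nxt with _ | ⟨vis', nxt'⟩
    · refine iff_of_true rfl ?_
      exact ⟨v, by simp, (bRow_none_iff obj (kids v) vis nxt).mp hrow⟩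
    · rw [ih]
      constructor
      · rintro ⟨w, hw, hk⟩; exact ⟨w, List.mem_cons_of_mem _ hw, hk⟩
      · rintro ⟨w, hw, hk⟩
        rcases List.mem_cons.mp hw with rfl | hw
        · have : bRow obj (kids w) vis nxt = none :=
            (bRow_none_iff obj (kids w) vis nxt).mpr hk
          rw [this] at hrow; cases hrow
        · exact ⟨w, hw, hk⟩

theorem bLevel_some (obj : Int) (fr : List Int) :
    ∀ (vis : PySem.Set Int) (nxt : List Int) (vis' : PySem.Set Int) (nxt' : List Int),
    bLevel obj fr vis nxt = some (vis', nxt') →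
      (∀ x, x ∈ vis' ↔ x ∈ vis ∨ ∃ v ∈ fr, x ∈ kids v) ∧
      (∀ x, x ∈ nxt' ↔ x ∈ nxt ∨ ((∃ v ∈ fr, x ∈ kids v) ∧ x ∉ vis)) := by
  induction fr with
  | nil =>
    intro vis nxt vis' nxt' h
    simp [bLevel] at h
    obtain ⟨h1, h2⟩ := h
    subst h1; subst h2; simp
  | cons v rest ih =>
    intro vis nxt vis' nxt' h
    simp only [bLevel] at h
    rcases hrow : bRow obj (kids v) vis nxt with _ | ⟨vis1, nxt1⟩
    · rw [hrow] at h; cases h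
    · rw [hrow] at h
      obtain ⟨hv1, hn1⟩ := bRow_some obj (kids v) vis nxt vis1 nxt1 hrow
      obtain ⟨hv, hn⟩ := ih vis1 nxt1 vis' nxt' h
      constructor
      · intro x
        rw [hv x, hv1 x]
        constructor
        · rintro ((h | h) | ⟨w, hw, hk⟩)
          · tauto
          · exact Or.inr ⟨v, by simp, h⟩
          · exact Or.inr ⟨w, List.mem_cons_of_mem _ hw, hk⟩
        · rintro (h | ⟨w, hw, hk⟩)
          · tauto
          · rcases List.mem_cons.mp hw with rfl | hw
            · exact Or.inl (Or.inr hk)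
            · exact Or.inr ⟨w, hw, hk⟩
      · intro x
        rw [hn x, hn1 x]
        constructor
        · rintro ((h | ⟨hk, hnv⟩) | ⟨⟨w, hw, hk⟩, hnv⟩)
          · tauto
          · exact Or.inr ⟨⟨v, by simp, hk⟩, hnv⟩
          · rw [hv1 x] at hnv
            push Not at hnv
            exact Or.inr ⟨⟨w, List.mem_cons_of_mem _ hw, hk⟩, hnv.1⟩
        · rintro (h | ⟨⟨w, hw, hk⟩, hnv⟩)
          · tauto
          · rcases List.mem_cons.mp hw with rfl | hw
            · exact Or.inl (Or.inr ⟨hk, hnv⟩)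
            · by_cases hkv : x ∈ kids v
              · exact Or.inl (Or.inr ⟨hkv, hnv⟩)
              · refine Or.inr ⟨⟨w, hw, hk⟩, ?_⟩
                rw [hv1 x]
                rintro (hc | hc)
                · exact hnv hc
                · exact hkv hc

theorem loop_eq (n obj : Int) :
    ∀ (fuel : Nat) (cnt : Int) (j : Nat) (q : List Int) (vis : PySem.Set Int) (fr : List Int),
    (∀ x, x ∈ q ↔ reachN n j x) →
    (∀ x, x ∈ vis ↔ ∃ i, i ≤ j ∧ reachN n i x) →
    (∀ x, x ∈ fr ↔ (reachN n j x ∧ ¬ ∃ i, i < j ∧ reachN n i x)) →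
    (∀ i, i < j → ∀ v, reachN n i v → obj ∉ kids v) →
    aLoop obj fuel cnt q = bLoop obj fuel cnt vis fr := by
  intro fuel
  induction fuel with
  | zero => intro cnt j q vis fr _ _ _ _; rfl
  | succ fuel ih =>
    intro cnt j q vis fr hq hvis hfr hmiss
    have hqne : ¬ (q = []) := by
      obtain ⟨x, hx⟩ := reachN_nonempty n j
      intro hc
      have := (hq x).mpr hx
      rw [hc] at this
      exact absurd this (List.not_mem_nil)
    simp only [aLoop, bLoop, if_neg hqne]
    rcases ha : aLevel obj q [] with _ | q'
    · -- A found obj at this level; show B finds it too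
      obtain ⟨v, hv, hk⟩ := (aLevel_none_iff obj q []).mp ha
      have hvr : reachN n j v := (hq v).mp hv
      have hvfr : v ∈ fr := by
        rw [hfr v]
        refine ⟨hvr, ?_⟩
        rintro ⟨i, hij, hri⟩
        exact hmiss i hij v hri hk
      rw [(bLevel_none_iff obj fr vis []).mpr ⟨v, hvfr, hk⟩]
    · -- no hit at this level in A, hence none in B (fr ⊆ q up to membership)
      have hnof : ¬ ∃ v ∈ q, obj ∈ kids v := by
        intro hc
        rw [← aLevel_none_iff obj q []] at hc
        rw [hc] at ha; cases ha
      rcases hb : bLevel obj fr vis [] with _ | ⟨vis', nxt⟩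
      · obtain ⟨v, hv, hk⟩ := (bLevel_none_iff obj fr vis []).mp hb
        exact absurd ⟨v, (hq v).mpr ((hfr v).mp hv).1, hk⟩ hnof
      · obtain ⟨hv', hn'⟩ := bLevel_some obj fr vis [] vis' nxt hb
        apply ih (cnt + 1) (j + 1)
        · -- queue = exactly (j+1)-reachable
          intro x
          rw [aLevel_some_mem obj q [] q' ha x]
          simp only [List.not_mem_nil, false_or]
          show _ ↔ ∃ v, reachN n j v ∧ x ∈ kids v
          constructor
          · rintro ⟨v, hv, hk⟩; exact ⟨v, (hq v).mp hv, hk⟩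
          · rintro ⟨v, hv, hk⟩; exact ⟨v, (hq v).mpr hv, hk⟩
        · -- visited = reachable within j+1
          intro x
          rw [hv' x]
          constructor
          · rintro (h | ⟨v, hvf, hk⟩)
            · obtain ⟨i, hi, hr⟩ := (hvis x).mp h
              exact ⟨i, Nat.le_succ_of_le hi, hr⟩
            · exact ⟨j + 1, le_refl _, v, ((hfr v).mp hvf).1, hk⟩
          · rintro ⟨i, hi, hr⟩
            by_cases hij : i ≤ j
            · exact Or.inl ((hvis x).mpr ⟨i, hij, hr⟩)
            · have hi1 : i = j + 1 := by omega
              subst hi1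
              obtain ⟨v, hv, hk⟩ := hr
              by_cases hvlow : ∃ i', i' < j ∧ reachN n i' v
              · obtain ⟨i', hi', hr'⟩ := hvlow
                exact Or.inl ((hvis x).mpr ⟨i' + 1, Nat.succ_le_of_lt hi', v, hr', hk⟩)
              · exact Or.inr ⟨v, (hfr v).mpr ⟨hv, hvlow⟩, hk⟩
        · -- next frontier = states newly reached at level j+1
          intro x
          rw [hn' x]
          simp only [List.not_mem_nil, false_or]
          constructor
          · rintro ⟨⟨v, hvf, hk⟩, hnv⟩
            refine ⟨⟨v, ((hfr v).mp hvf).1, hk⟩, ?_⟩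
            rintro ⟨i, hi, hr⟩
            exact hnv ((hvis x).mpr ⟨i, Nat.lt_succ_iff.mp hi, hr⟩)
          · rintro ⟨⟨v, hv, hk⟩, hnew⟩
            have hnv : x ∉ vis := by
              intro hc
              obtain ⟨i, hi, hr⟩ := (hvis x).mp hc
              exact hnew ⟨i, Nat.lt_succ_of_le hi, hr⟩
            refine ⟨⟨v, ?_, hk⟩, hnv⟩
            rw [hfr v]
            refine ⟨hv, ?_⟩
            rintro ⟨i', hi', hr'⟩
            exact hnew ⟨i' + 1, Nat.succ_lt_succ hi', v, hr', hk⟩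
        · -- no hit at any level ≤ j
          intro i hi v hr hk
          by_cases hij : i < j
          · exact hmiss i hij v hr hk
          · have : i = j := by omega
            subst this
            exact hnof ⟨v, (hq v).mpr hr, hk⟩

-- ===== VERDICT (by name: the statement is the Claim_ definition above) =====
theorem BFS_spec : Claim_equal_BFS := by
  intro n obj _
  show BFS n obj = BFS_alt n obj
  unfold BFS BFS_alt
  refine loop_eq n obj ((obj - n).natAbs + 2) 0 0 [n] (PySem.Set.ofList [n]) [n] ?_ ?_ ?_ ?_
  · intro x; simp [reachN]
  · intro x
    rw [PySem.Set.mem_ofList]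
    simp only [List.mem_singleton]
    constructor
    · rintro rfl; exact ⟨0, le_refl _, rfl⟩
    · rintro ⟨i, hi, hr⟩
      obtain rfl := Nat.le_zero.mp hi
      exact hr
  · intro x; simp [reachN]
  · intro i hi; exact absurd hi (Nat.not_lt_zero i)
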